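-- pv_equiv track=rewrite | github.com/aLexzzz430/Cognitive-OS | modules/hypothesis/mechanism_posterior_updater.py | canonical_target_family
-- ===== SOURCE A (Python) =====
-- from typing import Any, Dict, List, Optional, Sequence, Tuple
--
-- def canonical_target_family(value: Any) -> str:
--     text = str(value or '').strip()
--     if not text:
--         return ''
--     for prefix in ('target_kind::', 'effect::', 'semantic::', 'role::', 'anchor::', 'goal::'):
--         if text.startswith(prefix):
--             return text[len(prefix):]
--     return text
-- ===== SOURCE B (Python) =====
-- _FAMILIES = {'target_kind', 'effect', 'semantic', 'role', 'anchor', 'goal'}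
--
--
-- def canonical_target_family(value):
--     text = str(value or '').strip()
--     if not text:
--         return ''
--     head, sep, rest = text.partition('::')
--     if sep and head in _FAMILIES:
--         return rest
--     return text
-- ===== Notes on version B (the rewrite author's own statement) =====
-- stated objective: simpler
-- what changed: The ordered scan of six startswith tests (each with its own slice length) is replaced by a single partition at the first separator plus one set-membership lookup of the head.
import Mathlib
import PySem

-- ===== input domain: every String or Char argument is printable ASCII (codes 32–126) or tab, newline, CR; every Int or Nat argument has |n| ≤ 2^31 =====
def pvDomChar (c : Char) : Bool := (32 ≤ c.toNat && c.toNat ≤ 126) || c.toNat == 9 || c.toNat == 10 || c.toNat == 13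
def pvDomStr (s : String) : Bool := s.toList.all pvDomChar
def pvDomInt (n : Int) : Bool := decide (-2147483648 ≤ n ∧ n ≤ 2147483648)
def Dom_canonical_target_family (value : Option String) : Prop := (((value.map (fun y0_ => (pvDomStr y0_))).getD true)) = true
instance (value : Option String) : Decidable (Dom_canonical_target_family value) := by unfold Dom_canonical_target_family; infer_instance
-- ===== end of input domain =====

-- B replaces A's ordered scan of six startswith tests by one partition at the first '::' plus a set lookup (simpler decomposition, same cost).

-- ===== PORT A =====
-- the for-loop over the six prefixes: first match returns text[len(prefix):]
def ctfScan (text : String) : List String → String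
  | [] => text
  | p :: ps =>
      if PySem.Str.startswith text p then PySem.Str.slice text (some (PySem.Str.len p)) none
      else ctfScan text ps

def canonical_target_family (value : Option String) : String :=
  let text := PySem.Str.strip (value.getD "")
  if text = "" then ""
  else ctfScan text ["target_kind::", "effect::", "semantic::", "role::", "anchor::", "goal::"]

-- ===== PORT B =====
def ctfFamilies : List String := ["target_kind", "effect", "semantic", "role", "anchor", "goal"]

-- text.partition("::") ported by hand (exact): find gives the first occurrence or -1;
-- sep is empty iff find = -1, else head/rest are the slices around it.
def canonical_target_family_alt (value : Option String) : String :=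
  let text := PySem.Str.strip (value.getD "")
  if text = "" then ""
  else
    let i := PySem.Str.find text "::"
    if i = -1 then text
    else if PySem.Str.slice text none (some i) ∈ ctfFamilies then
      PySem.Str.slice text (some (i + 2)) none
    else text

-- ===== PRECONDITION & SPEC =====
def Spec_canonical_target_family (value : Option String) (out : String) : Prop := out = canonical_target_family_alt value
instance (value : Option String) (out : String) : Decidable (Spec_canonical_target_family value out) := by unfold Spec_canonical_target_family; infer_instance

-- ===== CLAIM (what is proved, stated in full; the proofs are below) =====
def Claim_equal_canonical_target_family : Prop := ∀ (value : Option String), Dom_canonical_target_family value → Spec_canonical_target_family value (canonical_target_family value)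

-- ===== LEMMAS AND PROOFS =====

-- If t starts with n ++ "::" and n has no colon, the first "::" in t sits exactly at |n|.
lemma ctf_key (t n : List Char) (hn : ':' ∉ n) (h : (n ++ [':', ':']) <+: t) :
    PySem.Chars.find t [':', ':'] = (n.length : Int) ∧ t.take n.length = n := by
  obtain ⟨s, hs⟩ := h
  have htake : t.take n.length = n := by
    rw [← hs]; simp
  have hdrop : t.drop n.length = [':', ':'] ++ s := by
    rw [← hs]; simp
  have h0 : [':', ':'] <+: t.drop n.length := ⟨s, by rw [hdrop]⟩
  have hj : ∀ j < n.length, ¬ ([':', ':'] <+: t.drop j) := by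
    intro j hjlt hp
    obtain ⟨u, hu⟩ := hp
    have hcol : t[j]? = some ':' := by
      have h1 : (t.drop j)[0]? = t[j]? := by
        simp
      rw [← h1, ← hu]; rfl
    have hnj : t[j]? = n[j]? := by
      conv_lhs => rw [← hs]
      rw [List.getElem?_append_left (by simp; omega), List.getElem?_append_left hjlt]
    rw [hnj, List.getElem?_eq_getElem hjlt] at hcol
    have hcn : n[j] = ':' := by injection hcol
    exact hn (hcn ▸ List.getElem_mem hjlt)
  have hinf : [':', ':'] <:+: t := (h0.isInfix).trans (List.drop_suffix _ t).isInfix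
  have hpos : 0 ≤ PySem.Chars.find t [':', ':'] := (PySem.Chars.find_nonneg_iff _ _).mpr hinf
  obtain ⟨hfp, hfmin⟩ := PySem.Chars.find_spec hpos
  have hne : (PySem.Chars.find t [':', ':']).toNat = n.length := by
    rcases lt_trichotomy (PySem.Chars.find t [':', ':']).toNat n.length with hlt | heq | hgt
    · exact absurd hfp (hj _ hlt)
    · exact heq
    · exact absurd h0 (hfmin _ hgt)
  refine ⟨?_, htake⟩
  omega

-- Conversely, a nonnegative find yields a prefix "head ++ ::" of t.
lemma ctf_head (t : List Char) (h0 : 0 ≤ PySem.Chars.find t [':', ':']) :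
    (t.take (PySem.Chars.find t [':', ':']).toNat ++ [':', ':']) <+: t := by
  obtain ⟨hfp, -⟩ := PySem.Chars.find_spec h0
  obtain ⟨s, hs⟩ := hfp
  exact ⟨s, by rw [List.append_assoc, hs, List.take_append_drop]⟩

-- one positive scan branch: the matching family determines find, head and rest
lemma ctf_pos (text n : String) (hn : ':' ∉ n.toList)
    (h : PySem.Chars.startswith text.toList (n.toList ++ [':', ':']) = true) :
    PySem.Chars.find text.toList [':', ':'] = (n.toList.length : Int) ∧
    PySem.Str.slice text none (some (n.toList.length : Int)) = n := by
  obtain ⟨hf, ht⟩ := ctf_key text.toList n.toList hn ((PySem.Chars.startswith_iff _ _).mp h)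
  refine ⟨hf, ?_⟩
  apply String.toList_inj.mp
  simp only [PySem.Str.toList_slice, PySem.Chars.slice_eq_listSlice]
  rw [PySem.List.slice_to _ (by positivity)]
  simpa using ht

lemma ctf_cc : "::".toList = [':', ':'] := by decide

-- the main equivalence on a (possibly empty) stripped text
lemma ctf_main (text : String) :
    ctfScan text ["target_kind::", "effect::", "semantic::", "role::", "anchor::", "goal::"]
      = (if PySem.Str.find text "::" = -1 then text
         else if PySem.Str.slice text none (some (PySem.Str.find text "::")) ∈ ctfFamilies then
           PySem.Str.slice text (some (PySem.Str.find text "::" + 2)) none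
         else text) := by
  rw [ctfScan]
  by_cases h0 : PySem.Str.startswith text "target_kind::" = true
  · rw [if_pos h0]
    have hsplit : ("target_kind::").toList = ("target_kind").toList ++ [':', ':'] := by decide
    have h' : PySem.Chars.startswith text.toList (("target_kind").toList ++ [':', ':']) = true := by
      have := h0; rw [PySem.Str.startswith_eq, hsplit] at this; exact this
    obtain ⟨hf, hsl⟩ := ctf_pos text "target_kind" (by decide) h'
    have hf' : PySem.Str.find text "::" = 11 := by
      rw [PySem.Str.find_eq, ctf_cc, hf]; decide
    have hsl' : PySem.Str.slice text none (some 11) = "target_kind" := by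
      exact_mod_cast hsl
    have hlen : PySem.Str.len "target_kind::" = 13 := by decide
    rw [hf', hlen, if_neg (by decide), hsl', if_pos (by decide)]
    norm_num
  rw [if_neg h0, ctfScan]
  by_cases h1 : PySem.Str.startswith text "effect::" = true
  · rw [if_pos h1]
    have hsplit : ("effect::").toList = ("effect").toList ++ [':', ':'] := by decide
    have h' : PySem.Chars.startswith text.toList (("effect").toList ++ [':', ':']) = true := by
      have := h1; rw [PySem.Str.startswith_eq, hsplit] at this; exact this
    obtain ⟨hf, hsl⟩ := ctf_pos text "effect" (by decide) h'
    have hf' : PySem.Str.find text "::" = 6 := by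
      rw [PySem.Str.find_eq, ctf_cc, hf]; decide
    have hsl' : PySem.Str.slice text none (some 6) = "effect" := by
      exact_mod_cast hsl
    have hlen : PySem.Str.len "effect::" = 8 := by decide
    rw [hf', hlen, if_neg (by decide), hsl', if_pos (by decide)]
    norm_num
  rw [if_neg h1, ctfScan]
  by_cases h2 : PySem.Str.startswith text "semantic::" = true
  · rw [if_pos h2]
    have hsplit : ("semantic::").toList = ("semantic").toList ++ [':', ':'] := by decide
    have h' : PySem.Chars.startswith text.toList (("semantic").toList ++ [':', ':']) = true := by
      have := h2; rw [PySem.Str.startswith_eq, hsplit] at this; exact this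
    obtain ⟨hf, hsl⟩ := ctf_pos text "semantic" (by decide) h'
    have hf' : PySem.Str.find text "::" = 8 := by
      rw [PySem.Str.find_eq, ctf_cc, hf]; decide
    have hsl' : PySem.Str.slice text none (some 8) = "semantic" := by
      exact_mod_cast hsl
    have hlen : PySem.Str.len "semantic::" = 10 := by decide
    rw [hf', hlen, if_neg (by decide), hsl', if_pos (by decide)]
    norm_num
  rw [if_neg h2, ctfScan]
  by_cases h3 : PySem.Str.startswith text "role::" = true
  · rw [if_pos h3]
    have hsplit : ("role::").toList = ("role").toList ++ [':', ':'] := by decide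
    have h' : PySem.Chars.startswith text.toList (("role").toList ++ [':', ':']) = true := by
      have := h3; rw [PySem.Str.startswith_eq, hsplit] at this; exact this
    obtain ⟨hf, hsl⟩ := ctf_pos text "role" (by decide) h'
    have hf' : PySem.Str.find text "::" = 4 := by
      rw [PySem.Str.find_eq, ctf_cc, hf]; decide
    have hsl' : PySem.Str.slice text none (some 4) = "role" := by
      exact_mod_cast hsl
    have hlen : PySem.Str.len "role::" = 6 := by decide
    rw [hf', hlen, if_neg (by decide), hsl', if_pos (by decide)]
    norm_num
  rw [if_neg h3, ctfScan]
  by_cases h4 : PySem.Str.startswith text "anchor::" = true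
  · rw [if_pos h4]
    have hsplit : ("anchor::").toList = ("anchor").toList ++ [':', ':'] := by decide
    have h' : PySem.Chars.startswith text.toList (("anchor").toList ++ [':', ':']) = true := by
      have := h4; rw [PySem.Str.startswith_eq, hsplit] at this; exact this
    obtain ⟨hf, hsl⟩ := ctf_pos text "anchor" (by decide) h'
    have hf' : PySem.Str.find text "::" = 6 := by
      rw [PySem.Str.find_eq, ctf_cc, hf]; decide
    have hsl' : PySem.Str.slice text none (some 6) = "anchor" := by
      exact_mod_cast hsl
    have hlen : PySem.Str.len "anchor::" = 8 := by decide
    rw [hf', hlen, if_neg (by decide), hsl', if_pos (by decide)]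
    norm_num
  rw [if_neg h4, ctfScan]
  by_cases h5 : PySem.Str.startswith text "goal::" = true
  · rw [if_pos h5]
    have hsplit : ("goal::").toList = ("goal").toList ++ [':', ':'] := by decide
    have h' : PySem.Chars.startswith text.toList (("goal").toList ++ [':', ':']) = true := by
      have := h5; rw [PySem.Str.startswith_eq, hsplit] at this; exact this
    obtain ⟨hf, hsl⟩ := ctf_pos text "goal" (by decide) h'
    have hf' : PySem.Str.find text "::" = 4 := by
      rw [PySem.Str.find_eq, ctf_cc, hf]; decide
    have hsl' : PySem.Str.slice text none (some 4) = "goal" := by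
      exact_mod_cast hsl
    have hlen : PySem.Str.len "goal::" = 6 := by decide
    rw [hf', hlen, if_neg (by decide), hsl', if_pos (by decide)]
    norm_num
  rw [if_neg h5]
  simp only [ctfScan]
  by_cases hm : PySem.Str.find text "::" = -1
  · rw [if_pos hm]
  · rw [if_neg hm]
    have hnn : 0 ≤ PySem.Chars.find text.toList [':', ':'] := by
      have hlb := PySem.Chars.neg_one_le_find text.toList [':', ':']
      have hne : PySem.Chars.find text.toList [':', ':'] ≠ -1 := by
        rw [PySem.Str.find_eq, ctf_cc] at hm; exact hm
      omega
    have hpre := ctf_head text.toList hnn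
    have hto : (PySem.Str.slice text none (some (PySem.Str.find text "::"))).toList
        = text.toList.take (PySem.Chars.find text.toList [':', ':']).toNat := by
      simp only [PySem.Str.toList_slice, PySem.Chars.slice_eq_listSlice, PySem.Str.find_eq, ctf_cc]
      rw [PySem.List.slice_to _ hnn]
    rw [if_neg ?_]
    intro hmem
    simp only [ctfFamilies, List.mem_cons, List.not_mem_nil, or_false] at hmem
    rcases hmem with hmem | hmem | hmem | hmem | hmem | hmem
    · have htk : text.toList.take (PySem.Chars.find text.toList [':', ':']).toNat = ("target_kind").toList := by
        rw [← hto, hmem]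
      exact h0 (by
        rw [PySem.Str.startswith_eq, show ("target_kind::").toList = ("target_kind").toList ++ [':', ':'] from by decide]
        exact (PySem.Chars.startswith_iff _ _).mpr (htk ▸ hpre))
    · have htk : text.toList.take (PySem.Chars.find text.toList [':', ':']).toNat = ("effect").toList := by
        rw [← hto, hmem]
      exact h1 (by
        rw [PySem.Str.startswith_eq, show ("effect::").toList = ("effect").toList ++ [':', ':'] from by decide]
        exact (PySem.Chars.startswith_iff _ _).mpr (htk ▸ hpre))
    · have htk : text.toList.take (PySem.Chars.find text.toList [':', ':']).toNat = ("semantic").toList := by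
        rw [← hto, hmem]
      exact h2 (by
        rw [PySem.Str.startswith_eq, show ("semantic::").toList = ("semantic").toList ++ [':', ':'] from by decide]
        exact (PySem.Chars.startswith_iff _ _).mpr (htk ▸ hpre))
    · have htk : text.toList.take (PySem.Chars.find text.toList [':', ':']).toNat = ("role").toList := by
        rw [← hto, hmem]
      exact h3 (by
        rw [PySem.Str.startswith_eq, show ("role::").toList = ("role").toList ++ [':', ':'] from by decide]
        exact (PySem.Chars.startswith_iff _ _).mpr (htk ▸ hpre))
    · have htk : text.toList.take (PySem.Chars.find text.toList [':', ':']).toNat = ("anchor").toList := by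
        rw [← hto, hmem]
      exact h4 (by
        rw [PySem.Str.startswith_eq, show ("anchor::").toList = ("anchor").toList ++ [':', ':'] from by decide]
        exact (PySem.Chars.startswith_iff _ _).mpr (htk ▸ hpre))
    · have htk : text.toList.take (PySem.Chars.find text.toList [':', ':']).toNat = ("goal").toList := by
        rw [← hto, hmem]
      exact h5 (by
        rw [PySem.Str.startswith_eq, show ("goal::").toList = ("goal").toList ++ [':', ':'] from by decide]
        exact (PySem.Chars.startswith_iff _ _).mpr (htk ▸ hpre))

-- ===== VERDICT (by name: the statement is the Claim_ definition above) =====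
theorem canonical_target_family_spec : Claim_equal_canonical_target_family := by
  intro value _
  unfold Spec_canonical_target_family canonical_target_family canonical_target_family_alt
  simp only []
  split
  · rfl
  · exact ctf_main _
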